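-- pv_equiv track=rewrite | github.com/HyderZhang/streamlit | seatmap-browser.py | generate_column_labels
-- ===== SOURCE A (Python) =====
-- def generate_column_labels(seats_per_row):
--     """
--     根据规则生成座位列标签：左侧为降序奇数、右侧为升序偶数
--     如 seats_per_row = 10 时生成：["09", "07", "05", "03", "01", "02", "04", "06", "08", "10"]
--     """
--     if seats_per_row % 2 == 0:
--         left_count = seats_per_row // 2
--         right_count = seats_per_row // 2
--     else:
--         left_count = seats_per_row // 2 + 1
--         right_count = seats_per_row // 2
--     labels = []
--     # 左侧：降序奇数
--     for i in range(left_count):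
--         num = 2 * left_count - (2 * i + 1)
--         labels.append(f"{num:02d}")
--     # 右侧：升序偶数
--     for i in range(right_count):
--         num = 2 * (i + 1)
--         labels.append(f"{num:02d}")
--     return labels
-- ===== SOURCE B (Python) =====
-- def generate_column_labels(seats_per_row):
--     odds, evens = [], []
--     for x in range(1, seats_per_row + 1):
--         (odds if x % 2 else evens).append(x)
--     return [f"{x:02d}" for x in reversed(odds)] + [f"{x:02d}" for x in evens]
-- ===== Notes on version B (the rewrite author's own statement) =====
-- stated objective: simpler
-- what changed: Replaces the left/right seat-count arithmetic and the descending index formula with a single parity partition of the value range into odds and evens, returning the reversed odds followed by the evens.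
import Mathlib
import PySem

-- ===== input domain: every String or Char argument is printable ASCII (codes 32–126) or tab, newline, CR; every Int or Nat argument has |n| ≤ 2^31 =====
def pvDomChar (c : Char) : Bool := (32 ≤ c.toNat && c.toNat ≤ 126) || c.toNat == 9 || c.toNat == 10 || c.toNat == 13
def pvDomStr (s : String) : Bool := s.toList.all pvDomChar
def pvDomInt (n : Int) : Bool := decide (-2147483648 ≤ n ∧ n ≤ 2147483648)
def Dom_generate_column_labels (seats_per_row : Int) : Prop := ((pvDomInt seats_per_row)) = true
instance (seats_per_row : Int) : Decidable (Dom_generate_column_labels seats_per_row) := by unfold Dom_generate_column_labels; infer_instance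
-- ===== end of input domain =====

-- B: one parity partition over range(1, n+1) instead of A's count arithmetic and index formula; objective: simpler.

-- ===== PORT A =====
-- f"{num:02d}" on an int equals str(num).zfill(2) (sign stays in front in both); exact.
def pyFmt02 (n : Int) : String := PySem.Str.zfill (PySem.Int.toStr n) 2

def generate_column_labels (seats_per_row : Int) : List String :=
  let counts : Int × Int :=
    if PySem.Int.mod seats_per_row 2 = 0 then
      (PySem.Int.floordiv seats_per_row 2, PySem.Int.floordiv seats_per_row 2)
    else
      (PySem.Int.floordiv seats_per_row 2 + 1, PySem.Int.floordiv seats_per_row 2)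
  let left_count := counts.1
  let right_count := counts.2
  let labels : List String := []
  let labels := (PySem.List.pyRange 0 left_count 1).foldl
    (fun labels i => labels ++ [pyFmt02 (2 * left_count - (2 * i + 1))]) labels
  let labels := (PySem.List.pyRange 0 right_count 1).foldl
    (fun labels i => labels ++ [pyFmt02 (2 * (i + 1))]) labels
  labels

-- ===== PORT B =====
def generate_column_labels_alt (seats_per_row : Int) : List String :=
  let oe : List Int × List Int :=
    (PySem.List.pyRange 1 (seats_per_row + 1) 1).foldl
      (fun oe x => if PySem.Int.mod x 2 ≠ 0 then (oe.1 ++ [x], oe.2) else (oe.1, oe.2 ++ [x]))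
      ([], [])
  oe.1.reverse.map pyFmt02 ++ oe.2.map pyFmt02

-- ===== PRECONDITION & SPEC =====
def Spec_generate_column_labels (seats_per_row : Int) (out : List String) : Prop := out = generate_column_labels_alt seats_per_row
instance (seats_per_row : Int) (out : List String) : Decidable (Spec_generate_column_labels seats_per_row out) := by unfold Spec_generate_column_labels; infer_instance

-- ===== CLAIM (what is proved, stated in full; the proofs are below) =====
def Claim_equal_generate_column_labels : Prop := ∀ (seats_per_row : Int), Dom_generate_column_labels seats_per_row → Spec_generate_column_labels seats_per_row (generate_column_labels seats_per_row)

-- ===== LEMMAS AND PROOFS =====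

-- B's partition loop: the pair fold is (filter odd, filter even) appended to the accumulator.
theorem partition_fold (l : List Int) (o e : List Int) :
    l.foldl (fun (oe : List Int × List Int) x =>
        if PySem.Int.mod x 2 ≠ 0 then (oe.1 ++ [x], oe.2) else (oe.1, oe.2 ++ [x])) (o, e)
    = (o ++ l.filter (fun x => decide (PySem.Int.mod x 2 ≠ 0)),
       e ++ l.filter (fun x => !decide (PySem.Int.mod x 2 ≠ 0))) := by
  induction l generalizing o e with
  | nil => simp
  | cons a t ih =>
    rw [List.foldl_cons, List.filter_cons, List.filter_cons]
    by_cases h : PySem.Int.mod a 2 ≠ 0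
    · have hd : decide (PySem.Int.mod a 2 ≠ 0) = true := decide_eq_true h
      rw [if_pos h, ih]
      have h2 : PySem.Int.mod a 2 = a % 2 := PySem.Int.mod_eq_emod_of_pos (by norm_num)
      rw [h2] at h
      simp
      omega
    · have hd : decide (PySem.Int.mod a 2 ≠ 0) = false := decide_eq_false h
      rw [if_neg h, ih]
      have h2 : PySem.Int.mod a 2 = a % 2 := PySem.Int.mod_eq_emod_of_pos (by norm_num)
      rw [h2] at h
      simp
      omega

-- A's left/right counts as helper functions (proof-only).
def lcount (n : Int) : Int :=
  if PySem.Int.mod n 2 = 0 then PySem.Int.floordiv n 2 else PySem.Int.floordiv n 2 + 1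

theorem odds_filter (m : Nat) :
    ((List.range m).map (fun k : Nat => (1 : Int) + k)).filter
        (fun x => decide (PySem.Int.mod x 2 ≠ 0))
    = (List.range ((m + 1) / 2)).map (fun i : Nat => 2 * (i : Int) + 1) := by
  induction m with
  | zero => simp
  | succ m ih =>
    rw [List.range_succ, List.map_append, List.filter_append, ih]
    have hmod : PySem.Int.mod ((1:Int) + m) 2 = ((1:Int) + m) % 2 :=
      PySem.Int.mod_eq_emod_of_pos (by norm_num)
    by_cases h : m % 2 = 0
    · have hodd : ((1:Int) + m) % 2 ≠ 0 := by omega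
      have hr : (m + 1 + 1) / 2 = (m + 1) / 2 + 1 := by omega
      rw [hr, List.range_succ, List.map_append]
      simp only [List.map_cons, List.map_nil, List.filter_cons, List.filter_nil, hmod]
      rw [decide_eq_true hodd]
      simp only [if_true]
      congr 1
      · congr 1
        omega
    · have heven : ¬ (((1:Int) + m) % 2 ≠ 0) := by omega
      have hr : (m + 1 + 1) / 2 = (m + 1) / 2 := by omega
      rw [hr]
      simp only [List.map_cons, List.map_nil, List.filter_cons, List.filter_nil, hmod]
      rw [decide_eq_false heven]
      simp

theorem evens_filter (m : Nat) :
    ((List.range m).map (fun k : Nat => (1 : Int) + k)).filter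
        (fun x => !decide (PySem.Int.mod x 2 ≠ 0))
    = (List.range (m / 2)).map (fun i : Nat => 2 * ((i : Int) + 1)) := by
  induction m with
  | zero => simp
  | succ m ih =>
    rw [List.range_succ, List.map_append, List.filter_append, ih]
    have hmod : PySem.Int.mod ((1:Int) + m) 2 = ((1:Int) + m) % 2 :=
      PySem.Int.mod_eq_emod_of_pos (by norm_num)
    by_cases h : m % 2 = 0
    · have hodd : ((1:Int) + m) % 2 ≠ 0 := by omega
      have hr : (m + 1) / 2 = m / 2 := by omega
      rw [hr]
      simp only [List.map_cons, List.map_nil, List.filter_cons, List.filter_nil, hmod]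
      rw [decide_eq_true hodd]
      simp
    · have heven : ¬ (((1:Int) + m) % 2 ≠ 0) := by omega
      have hr : (m + 1) / 2 = m / 2 + 1 := by omega
      rw [hr, List.range_succ, List.map_append]
      simp only [List.map_cons, List.map_nil, List.filter_cons, List.filter_nil, hmod]
      rw [decide_eq_false heven]
      simp only [Bool.not_false, if_true]
      congr 2
      omega

theorem reverse_range_map {α : Type} (k : Nat) (f : Nat → α) :
    ((List.range k).map f).reverse = (List.range k).map (fun i => f (k - 1 - i)) := by
  apply List.ext_getElem
  · simp
  · intro i h1 h2
    simp only [List.length_map, List.length_range, List.length_reverse] at h1 h2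
    rw [List.getElem_reverse]
    simp only [List.getElem_map, List.getElem_range, List.length_map, List.length_range]

-- A's two append loops are maps over the two ranges.
theorem A_eq (n : Int) :
    generate_column_labels n =
      (PySem.List.pyRange 0 (lcount n) 1).map (fun i => pyFmt02 (2 * lcount n - (2 * i + 1)))
      ++ (PySem.List.pyRange 0 (PySem.Int.floordiv n 2) 1).map (fun i => pyFmt02 (2 * (i + 1))) := by
  unfold generate_column_labels lcount
  by_cases h : PySem.Int.mod n 2 = 0
  · simp only [if_pos h]
    rw [PySem.List.foldl_append_singleton_eq_map, PySem.List.foldl_append_singleton_eq_map]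
    simp
  · simp only [if_neg h]
    rw [PySem.List.foldl_append_singleton_eq_map, PySem.List.foldl_append_singleton_eq_map]
    simp

-- B is (reversed odds, then evens) of the 1..n range.
theorem B_eq (n : Int) :
    generate_column_labels_alt n =
      (((PySem.List.pyRange 1 (n + 1) 1).filter
          (fun x => decide (PySem.Int.mod x 2 ≠ 0))).reverse.map pyFmt02)
      ++ (((PySem.List.pyRange 1 (n + 1) 1).filter
          (fun x => !decide (PySem.Int.mod x 2 ≠ 0))).map pyFmt02) := by
  unfold generate_column_labels_alt
  rw [partition_fold]
  simp

theorem lcount_cast (m : Nat) : lcount (m : Int) = (((m + 1) / 2 : Nat) : Int) := by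
  unfold lcount
  have hmod : PySem.Int.mod (m : Int) 2 = (m : Int) % 2 :=
    PySem.Int.mod_eq_emod_of_pos (by norm_num)
  have hdiv : PySem.Int.floordiv (m : Int) 2 = (m : Int) / 2 :=
    PySem.Int.floordiv_eq_ediv_of_pos (by norm_num)
  rw [hmod, hdiv]
  by_cases h : (m : Int) % 2 = 0
  · rw [if_pos h]; omega
  · rw [if_neg h]; omega

theorem rcount_cast (m : Nat) : PySem.Int.floordiv (m : Int) 2 = ((m / 2 : Nat) : Int) := by
  rw [PySem.Int.floordiv_eq_ediv_of_pos (by norm_num)]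
  omega

-- ===== VERDICT (by name: the statement is the Claim_ definition above) =====
theorem generate_column_labels_spec : Claim_equal_generate_column_labels := by
  intro n _
  unfold Spec_generate_column_labels
  rw [A_eq, B_eq]
  rcases le_or_gt n 0 with hn | hn
  · -- empty on both sides
    have h1 : lcount n ≤ 0 := by
      unfold lcount
      have hdiv : PySem.Int.floordiv n 2 = n / 2 := PySem.Int.floordiv_eq_ediv_of_pos (by norm_num)
      have hmod : PySem.Int.mod n 2 = n % 2 := PySem.Int.mod_eq_emod_of_pos (by norm_num)
      rw [hmod, hdiv]
      by_cases h : n % 2 = 0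
      · rw [if_pos h]; omega
      · rw [if_neg h]; omega
    have h2 : PySem.Int.floordiv n 2 ≤ 0 := by
      rw [PySem.Int.floordiv_eq_ediv_of_pos (by norm_num)]; omega
    rw [PySem.List.pyRange_one_eq_nil h1, PySem.List.pyRange_one_eq_nil h2,
        PySem.List.pyRange_one_eq_nil (by omega : n + 1 ≤ 1)]
    simp
  · -- n = ↑m, m : Nat
    obtain ⟨m, rfl⟩ : ∃ m : Nat, n = (m : Int) := ⟨n.toNat, by omega⟩
    rw [lcount_cast, rcount_cast]
    rw [PySem.List.pyRange_one (a := 1) (b := (m : Int) + 1)]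
    have hm : (((m : Int) + 1) - 1).toNat = m := by omega
    rw [hm]
    rw [odds_filter, evens_filter]
    rw [PySem.List.pyRange_one (a := 0) (b := (((m + 1) / 2 : Nat) : Int))]
    rw [PySem.List.pyRange_one (a := 0) (b := ((m / 2 : Nat) : Int))]
    have hL : ((((m + 1) / 2 : Nat) : Int) - 0).toNat = (m + 1) / 2 := by omega
    have hR : (((m / 2 : Nat) : Int) - 0).toNat = m / 2 := by omega
    rw [hL, hR, List.map_map, List.map_map, List.map_reverse, List.map_map, List.map_map]
    rw [reverse_range_map]
    refine congrArg₂ (· ++ ·) ?_ ?_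
    · apply List.map_congr_left
      intro i hi
      rw [List.mem_range] at hi
      simp only [Function.comp]
      congr 1
      omega
    · apply List.map_congr_left
      intro i hi
      simp only [Function.comp]
      congr 2
      omega
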